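-- pv_equiv track=rewrite | github.com/G-R-O-X/Grox_chat | src/grox_chat/server.py | _has_required_summary_sections
-- ===== SOURCE A (Python) =====
-- SUMMARY_SECTION_HEADERS = (
--     "TRAJECTORY:",
--     "CONSENSUS:",
--     "BLOCKERS:",
--     "EVIDENCE GAPS:",
--     "AGENT DELTAS:",
-- )
--
-- def _has_required_summary_sections(content: str) -> bool:
--     line_cursor = -1
--     lines = (content or "").splitlines()
--     for header in SUMMARY_SECTION_HEADERS:
--         position = next(
--             (index for index, line in enumerate(lines) if index > line_cursor and line.strip().startswith(header)),
--             -1,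
--         )
--         if position < 0:
--             return False
--         line_cursor = position
--     return True
-- ===== SOURCE B (Python) =====
-- SUMMARY_SECTION_HEADERS = (
--     "TRAJECTORY:",
--     "CONSENSUS:",
--     "BLOCKERS:",
--     "EVIDENCE GAPS:",
--     "AGENT DELTAS:",
-- )
--
-- def _has_required_summary_sections(content: str) -> bool:
--     # single forward pass: advance one expected header per matching line
--     idx = 0
--     for line in (content or "").splitlines():
--         if idx < len(SUMMARY_SECTION_HEADERS) and line.strip().startswith(SUMMARY_SECTION_HEADERS[idx]):
--             idx += 1
--     return idx == len(SUMMARY_SECTION_HEADERS)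
-- ===== Notes on version B (the rewrite author's own statement) =====
-- stated objective: simpler
-- what changed: Replaces the per-header rescan of the line list (next(...) with an index cursor for each of the 5 headers) with a single forward pass over the lines that keeps one integer index into the header tuple and advances it at most once per line.
import Mathlib
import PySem

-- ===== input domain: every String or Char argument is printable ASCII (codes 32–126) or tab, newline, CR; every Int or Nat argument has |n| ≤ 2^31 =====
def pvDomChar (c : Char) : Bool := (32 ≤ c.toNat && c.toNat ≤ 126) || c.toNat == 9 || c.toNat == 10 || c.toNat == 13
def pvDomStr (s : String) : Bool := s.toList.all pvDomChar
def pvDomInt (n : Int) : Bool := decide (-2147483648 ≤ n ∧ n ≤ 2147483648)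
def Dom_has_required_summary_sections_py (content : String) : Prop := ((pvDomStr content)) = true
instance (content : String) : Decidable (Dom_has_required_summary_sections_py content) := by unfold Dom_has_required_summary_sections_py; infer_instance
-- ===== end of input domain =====

-- B replaces A's per-header rescans of the line list with one forward pass keeping an
-- index into the header tuple (objective: simpler).

-- SUMMARY_SECTION_HEADERS
def pvHeaders : List String :=
  ["TRAJECTORY:", "CONSENSUS:", "BLOCKERS:", "EVIDENCE GAPS:", "AGENT DELTAS:"]

-- line.strip().startswith(header) — the test both programs apply verbatim
def pvM (header line : String) : Bool := PySem.Str.startswith (PySem.Str.strip line) header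

-- ===== PORT A =====
-- next((index for index, line in enumerate(lines) if index > line_cursor and line.strip().startswith(header)), -1)
def pvFindA (cursor : Int) (header : String) : List (Int × String) → Int
  | [] => -1
  | (i, line) :: rest =>
      if decide (i > cursor) && pvM header line then i
      else pvFindA cursor header rest

-- the 'for header in SUMMARY_SECTION_HEADERS' loop, carrying line_cursor
def pvLoopA (lines : List String) : List String → Int → Bool
  | [], _ => true
  | h :: hs, cursor =>
      let position := pvFindA cursor h (PySem.List.enumerate lines 0)
      if position < 0 then false else pvLoopA lines hs position

def has_required_summary_sections_py (content : String) : Bool :=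
  -- (content or "").splitlines(): for a string, 'content or ""' is content itself ("" or "" = "")
  pvLoopA (PySem.Str.splitlines content) pvHeaders (-1)

-- ===== PORT B =====
-- loop body: if idx < len(headers) and line.strip().startswith(headers[idx]): idx += 1
def pvStepB (idx : Nat) (line : String) : Nat :=
  if idx < pvHeaders.length && pvM (pvHeaders.getD idx "") line then idx + 1 else idx

def has_required_summary_sections_py_alt (content : String) : Bool :=
  ((PySem.Str.splitlines content).foldl pvStepB 0) == pvHeaders.length

-- ===== PRECONDITION & SPEC =====
def Spec_has_required_summary_sections_py (content : String) (out : Bool) : Prop := out = has_required_summary_sections_py_alt content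
instance (content : String) (out : Bool) : Decidable (Spec_has_required_summary_sections_py content out) := by unfold Spec_has_required_summary_sections_py; infer_instance

-- ===== CLAIM (what is proved, stated in full; the proofs are below) =====
def Claim_equal_has_required_summary_sections_py : Prop := ∀ (content : String), Dom_has_required_summary_sections_py content → Spec_has_required_summary_sections_py content (has_required_summary_sections_py content)

-- ===== LEMMAS AND PROOFS =====

-- greedy subsequence scanner: the remaining headers after consuming the lines
def pvScan : List String → List String → List String
  | _, [] => []
  | [], hs => hs
  | l :: ls, h :: hs => if pvM h l then pvScan ls hs else pvScan ls (h :: hs)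

theorem pvScan_nil (ls : List String) : pvScan ls [] = [] := by cases ls <;> rfl

theorem pvScan_len_le (ls hs : List String) : (pvScan ls hs).length ≤ hs.length := by
  induction ls generalizing hs with
  | nil => cases hs <;> simp [pvScan]
  | cons l ls ih =>
    cases hs with
    | nil => simp [pvScan]
    | cons h hs =>
      simp only [pvScan]
      split
      · exact le_trans (ih hs) (by simp)
      · exact ih (h :: hs)

-- ---- B side: the foldl counts the headers pvScan consumes ----

theorem foldlB_full (ls : List String) : ls.foldl pvStepB pvHeaders.length = pvHeaders.length := by
  induction ls with
  | nil => rfl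
  | cons l ls ih => simpa [pvStepB] using ih

theorem foldlB_scan (ls : List String) (idx : Nat) (h : idx ≤ pvHeaders.length) :
    ls.foldl pvStepB idx = pvHeaders.length - (pvScan ls (pvHeaders.drop idx)).length := by
  induction ls generalizing idx with
  | nil =>
    cases Nat.lt_or_ge idx pvHeaders.length with
    | inl hlt =>
      rw [List.drop_eq_getElem_cons hlt]
      simp [pvScan]
      omega
    | inr hge =>
      have : idx = pvHeaders.length := le_antisymm h hge
      subst this
      simp [pvScan_nil]
  | cons l ls ih =>
    cases Nat.lt_or_ge idx pvHeaders.length with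
    | inl hlt =>
      have hget : pvHeaders.getD idx "" = pvHeaders[idx] := by
        simp [List.getD_eq_getElem?_getD, List.getElem?_eq_getElem hlt]
      rw [List.drop_eq_getElem_cons hlt]
      simp only [List.foldl_cons, pvStepB, hget, hlt, decide_true, Bool.true_and, pvScan]
      split
      · exact ih (idx + 1) hlt
      · rw [ih idx h, List.drop_eq_getElem_cons hlt]
    | inr hge =>
      have : idx = pvHeaders.length := le_antisymm h hge
      subst this
      simp only [List.drop_length, pvScan_nil, List.length_nil, Nat.sub_zero]
      exact foldlB_full _

theorem altB_scan (content : String) :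
    has_required_summary_sections_py_alt content =
      (pvScan (PySem.Str.splitlines content) pvHeaders).isEmpty := by
  unfold has_required_summary_sections_py_alt
  rw [foldlB_scan _ 0 (Nat.zero_le _)]
  simp only [List.drop_zero]
  have hle := pvScan_len_le (PySem.Str.splitlines content) pvHeaders
  cases e : pvScan (PySem.Str.splitlines content) pvHeaders with
  | nil => simp
  | cons x xs =>
    rw [e] at hle
    simp only [List.isEmpty_cons, List.length_cons]
    simp only [List.length_cons] at hle
    rw [beq_eq_false_iff_ne]
    omega

-- ---- A side: pvFindA over enumerate finds the first match after the cursor ----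

theorem findA_all_after (ls : List String) (h : String) (s c : Int) (hc : c < s) :
    pvFindA c h (PySem.List.enumerate ls s) =
      (match ls.findIdx? (pvM h) with
       | none => -1
       | some j => s + j) := by
  induction ls generalizing s with
  | nil => rfl
  | cons l ls ih =>
    rw [PySem.List.enumerate_cons]
    simp only [pvFindA, List.findIdx?_cons, decide_eq_true (show s > c from hc), Bool.true_and]
    by_cases hm : pvM h l = true
    · simp [hm]
    · have hm' : pvM h l = false := by simpa using hm
      simp only [hm', Bool.false_eq_true, if_false]
      rw [ih (s + 1) (by omega)]
      cases hfi : ls.findIdx? (pvM h) with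
      | none => simp
      | some j =>
        simp only [Option.map_some]
        push_cast
        ring

theorem findA_skip (h : String) (c : Int) (pre rest : List (Int × String))
    (hpre : ∀ p ∈ pre, ¬ p.1 > c) :
    pvFindA c h (pre ++ rest) = pvFindA c h rest := by
  induction pre with
  | nil => rfl
  | cons p ps ih =>
    obtain ⟨i, line⟩ := p
    have hic : ¬ (i > c) := hpre (i, line) (by simp)
    simp only [List.cons_append, pvFindA, decide_eq_false hic, Bool.false_and,
      Bool.false_eq_true, if_false]
    exact ih (fun q hq => hpre q (by simp [hq]))

theorem findA_drop (lines : List String) (h : String) (n : Nat) (hn : n ≤ lines.length) :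
    pvFindA ((n : Int) - 1) h (PySem.List.enumerate lines 0) =
      (match (lines.drop n).findIdx? (pvM h) with
       | none => -1
       | some j => (n : Int) + j) := by
  conv_lhs => rw [← List.take_append_drop n lines]
  rw [PySem.List.enumerate_append]
  rw [findA_skip _ _ _ _ (by
    intro p hp
    rw [PySem.List.mem_enumerate_iff] at hp
    obtain ⟨k, hk, rfl⟩ := hp
    have : k < n := lt_of_lt_of_le hk (by simp)
    simp; omega)]
  have hlen : (0 : Int) + (lines.take n).length = (n : Int) := by
    simp [List.length_take, Nat.min_eq_left hn]
  rw [hlen, findA_all_after _ _ _ _ (by omega)]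

theorem scan_step (ls : List String) (h : String) (hs : List String) :
    (pvScan ls (h :: hs)).isEmpty =
      (match ls.findIdx? (pvM h) with
       | none => false
       | some j => (pvScan (ls.drop (j + 1)) hs).isEmpty) := by
  induction ls with
  | nil => simp [pvScan, List.findIdx?_nil]
  | cons l ls ih =>
    rw [List.findIdx?_cons]
    by_cases hm : pvM h l = true
    · simp [pvScan, hm]
    · have hm' : pvM h l = false := by simpa using hm
      simp only [pvScan, hm', Bool.false_eq_true, if_false, ih]
      cases ls.findIdx? (pvM h) with
      | none => simp
      | some j => simp

theorem loopA_scan (lines : List String) (hs : List String) (n : Nat) (hn : n ≤ lines.length) :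
    pvLoopA lines hs ((n : Int) - 1) = (pvScan (lines.drop n) hs).isEmpty := by
  induction hs generalizing n with
  | nil => simp [pvLoopA, pvScan_nil]
  | cons h hs ih =>
    simp only [pvLoopA, findA_drop lines h n hn, scan_step]
    cases hfi : (lines.drop n).findIdx? (pvM h) with
    | none => simp
    | some j =>
      have hj : j < (lines.drop n).length := by
        rcases (List.findIdx?_eq_some_iff_getElem.mp hfi) with ⟨hlt, _⟩
        exact hlt
      have hjn : n + j + 1 ≤ lines.length := by
        rw [List.length_drop] at hj; omega
      have hpos : ¬ ((n : Int) + j < 0) := by omega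
      simp only [hpos, if_false]
      have hcast : (n : Int) + j = ((n + j + 1 : Nat) : Int) - 1 := by push_cast; ring
      rw [hcast, ih (n + j + 1) hjn, List.drop_drop]
      have hidx : n + (j + 1) = n + j + 1 := by omega
      rw [hidx]

-- ===== VERDICT (by name: the statement is the Claim_ definition above) =====
theorem has_required_summary_sections_py_spec : Claim_equal_has_required_summary_sections_py := by
  intro content _
  unfold Spec_has_required_summary_sections_py has_required_summary_sections_py
  rw [altB_scan]
  have h := loopA_scan (PySem.Str.splitlines content) pvHeaders 0 (Nat.zero_le _)
  simpa using h
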